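-- pv_equiv track=rewrite | github.com/AsyncSite/slack-emoji-packs | scripts/update_packs_json.py | generate_pack_preview
-- ===== SOURCE A (Python) =====
-- from typing import Dict, List, Any
--
-- def generate_pack_preview(emoji_files: List[str], existing_preview: List[str] = None) -> List[str]:
--     """Generate preview emoji list for a pack with extensions."""
--     if existing_preview and len(existing_preview) >= 4:
--         # Check if existing preview has extensions, if not add them
--         valid_preview = []
--         for preview_item in existing_preview:
--             if '.' in preview_item:
--                 # Already has extension, check if file exists
--                 if preview_item in emoji_files:
--                     valid_preview.append(preview_item)
--             else:
--                 # No extension, try to find matching file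
--                 for emoji_file in emoji_files:
--                     if emoji_file.startswith(preview_item + '.'):
--                         valid_preview.append(emoji_file)
--                         break
--
--         if len(valid_preview) >= 4:
--             return valid_preview[:4]
--
--     # Auto-generate preview from available emojis
--     preview = []
--
--     # Prioritize certain emoji names for preview
--     priority_names = ['unicorn', 'rocket', 'fire', 'star', 'heart', 'party',
--                      'celebrate', 'wow', 'cool', 'awesome', 'loading', 'spinner']
--
--     # Add priority emojis first
--     for name in priority_names:
--         for emoji in emoji_files:
--             emoji_name = emoji.rsplit('.', 1)[0]  # Get name without extension
--             if name in emoji_name.lower() and emoji not in preview: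
--                 preview.append(emoji)
--                 if len(preview) >= 4:
--                     return preview
--
--     # Fill remaining with first available emojis
--     for emoji in emoji_files:
--         if emoji not in preview:
--             preview.append(emoji)
--             if len(preview) >= 4:
--                 return preview
--
--     return preview
-- ===== SOURCE B (Python) =====
-- def generate_pack_preview(emoji_files, existing_preview=None):
--     """Generate preview emoji list for a pack with extensions."""
--     if existing_preview and len(existing_preview) >= 4:
--         valid_preview = []
--         for preview_item in existing_preview:
--             if '.' in preview_item:
--                 if preview_item in emoji_files:
--                     valid_preview.append(preview_item)
--             else:
--                 for emoji_file in emoji_files: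
--                     if emoji_file.startswith(preview_item + '.'):
--                         valid_preview.append(emoji_file)
--                         break
--         if len(valid_preview) >= 4:
--             return valid_preview[:4]
--
--     priority_names = ['unicorn', 'rocket', 'fire', 'star', 'heart', 'party',
--                       'celebrate', 'wow', 'cool', 'awesome', 'loading', 'spinner']
--     # Bucket sort by priority rank: ONE pass over the files drops each file into
--     # the bucket of the first priority name contained in its stem (last bucket =
--     # no match); flatten the buckets, dedup keeping first occurrences, take 4.
--     sentinel = len(priority_names)
--     buckets = [[] for _ in range(sentinel + 1)]
--     for e in emoji_files:
--         stem = e.rsplit('.', 1)[0].lower()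
--         r = next((i for i, n in enumerate(priority_names) if n in stem), sentinel)
--         buckets[r].append(e)
--     merged = [e for b in buckets for e in b]
--     return list(dict.fromkeys(merged))[:4]
-- ===== Notes on version B (the rewrite author's own statement) =====
-- stated objective: alternative
-- what changed: The auto-generate part's twelve name-major scans over the files (with an in-loop membership test and early returns) are replaced by a one-pass bucket sort: each file is dropped into the bucket of the first priority name its stem contains (a 13th bucket for non-matches), then the buckets are flattened, deduped keeping first occurrences, and the first 4 are returned; the existing_preview block is unchanged.
import Mathlib
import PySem

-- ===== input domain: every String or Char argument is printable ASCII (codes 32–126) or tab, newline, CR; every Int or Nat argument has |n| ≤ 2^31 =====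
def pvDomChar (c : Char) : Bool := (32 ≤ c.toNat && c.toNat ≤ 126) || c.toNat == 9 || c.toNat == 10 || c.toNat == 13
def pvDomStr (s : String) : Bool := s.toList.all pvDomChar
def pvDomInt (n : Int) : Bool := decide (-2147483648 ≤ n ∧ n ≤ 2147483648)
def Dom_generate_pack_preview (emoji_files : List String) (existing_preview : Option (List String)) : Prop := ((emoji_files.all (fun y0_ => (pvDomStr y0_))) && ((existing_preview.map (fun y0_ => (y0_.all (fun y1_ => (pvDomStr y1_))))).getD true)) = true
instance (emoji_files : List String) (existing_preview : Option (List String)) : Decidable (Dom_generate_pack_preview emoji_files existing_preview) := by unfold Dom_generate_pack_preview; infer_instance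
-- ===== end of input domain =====

-- B replaces A's nested name-major scans (12 passes over the files with an in-loop
-- membership test and early returns) by a one-pass bucket sort on the priority rank
-- of each file, then flatten + ordered dedup + take 4; objective: alternative.

-- shared helpers (identical code in both Pythons: the existing_preview block and the literals)

-- s.rsplit('.', 1)[0]: everything before the LAST '.', or s itself if there is no '.'.
-- Ported by hand (PySem has no rsplit): exact — drop the reversed suffix up to and
-- including the first '.' of the reversed list, i.e. the suffix after the last '.'.
def pvStem (s : String) : String :=
  let r := s.toList.reverse
  if r.contains '.' then String.ofList ((r.dropWhile (fun c => c ≠ '.')).drop 1).reverse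
  else s

def pvPriority : List String :=
  ["unicorn", "rocket", "fire", "star", "heart", "party",
   "celebrate", "wow", "cool", "awesome", "loading", "spinner"]

def pvMatches (name e : String) : Bool :=
  PySem.Str.isIn name (PySem.Str.lower (pvStem e))

-- the existing_preview validation loop (identical code in A and B)
def pvValidPreview (emoji_files : List String) (existing : List String) : List String :=
  existing.foldl (fun valid item =>
    if PySem.Str.isIn "." item then
      if emoji_files.contains item then valid ++ [item] else valid
    else
      match emoji_files.find? (fun f => PySem.Str.startswith f (item ++ ".")) with
      | some f => valid ++ [f]
      | none => valid) []

-- ===== PORT A =====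
-- inner 'for emoji in emoji_files' of the priority loop; Sum.inl = early 'return preview'
def pvInnerA (files : List String) (name : String) (preview : List String) :
    List String ⊕ List String :=
  match files with
  | [] => Sum.inr preview
  | e :: rest =>
    if pvMatches name e && !(preview.contains e) then
      let p := preview ++ [e]
      if 4 ≤ p.length then Sum.inl p else pvInnerA rest name p
    else pvInnerA rest name preview

-- outer 'for name in priority_names'
def pvOuterA (files : List String) (names : List String) (preview : List String) :
    List String ⊕ List String :=
  match names with
  | [] => Sum.inr preview
  | n :: rest =>
    match pvInnerA files n preview with
    | Sum.inl r => Sum.inl r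
    | Sum.inr p => pvOuterA files rest p

-- 'fill remaining with first available emojis'
def pvFillA (files : List String) (preview : List String) : List String :=
  match files with
  | [] => preview
  | e :: rest =>
    if !(preview.contains e) then
      let p := preview ++ [e]
      if 4 ≤ p.length then p else pvFillA rest p
    else pvFillA rest preview

def pvAutoA (files : List String) : List String :=
  match pvOuterA files pvPriority [] with
  | Sum.inl r => r
  | Sum.inr p => pvFillA files p

def generate_pack_preview (emoji_files : List String) (existing_preview : Option (List String)) : List String :=
  match existing_preview with
  | some ex =>
    if 4 ≤ ex.length then
      let valid := pvValidPreview emoji_files ex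
      if 4 ≤ valid.length then valid.take 4 else pvAutoA emoji_files
    else pvAutoA emoji_files
  | none => pvAutoA emoji_files

-- ===== PORT B =====
-- rank of a file: next((i for i, n in enumerate(priority_names) if n in stem), sentinel)
-- = index of the first priority name contained in the stem, 12 (= len) if none: List.findIdx.
def pvRank (e : String) : Nat :=
  pvPriority.findIdx (fun n => pvMatches n e)

-- 'buckets[r].append(e)' for each file, buckets has sentinel+1 = 13 slots
def pvBucketStep (b : List (List String)) (e : String) : List (List String) :=
  b.set (pvRank e) (b.getD (pvRank e) [] ++ [e])

def pvAutoB (files : List String) : List String :=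
  let buckets := files.foldl pvBucketStep (List.replicate 13 [])
  let merged := buckets.flatMap id
  (PySem.List.dedup merged).take 4

def generate_pack_preview_alt (emoji_files : List String) (existing_preview : Option (List String)) : List String :=
  match existing_preview with
  | some ex =>
    if 4 ≤ ex.length then
      let valid := pvValidPreview emoji_files ex
      if 4 ≤ valid.length then valid.take 4 else pvAutoB emoji_files
    else pvAutoB emoji_files
  | none => pvAutoB emoji_files

-- ===== PRECONDITION & SPEC =====
def Spec_generate_pack_preview (emoji_files : List String) (existing_preview : Option (List String)) (out : List String) : Prop := out = generate_pack_preview_alt emoji_files existing_preview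
instance (emoji_files : List String) (existing_preview : Option (List String)) (out : List String) : Decidable (Spec_generate_pack_preview emoji_files existing_preview out) := by unfold Spec_generate_pack_preview; infer_instance

-- ===== CLAIM (what is proved, stated in full; the proofs are below) =====
def Claim_equal_generate_pack_preview : Prop := ∀ (emoji_files : List String) (existing_preview : Option (List String)), Dom_generate_pack_preview emoji_files existing_preview → Spec_generate_pack_preview emoji_files existing_preview (generate_pack_preview emoji_files existing_preview)

-- ===== LEMMAS AND PROOFS =====

-- abstract single stream processor: dedup-append with early stop at 4 (A's loops are this)
def pvStep (s : List String) (p : List String) : List String ⊕ List String :=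
  match s with
  | [] => Sum.inr p
  | e :: rest =>
    if p.contains e then pvStep rest p
    else
      let p' := p ++ [e]
      if 4 ≤ p'.length then Sum.inl p' else pvStep rest p'

def pvFinish (r : List String ⊕ List String) : List String :=
  match r with | Sum.inl x => x | Sum.inr x => x

theorem pvInnerA_eq_step (files : List String) (name : String) (p : List String) :
    pvInnerA files name p = pvStep (files.filter (fun e => pvMatches name e)) p := by
  induction files generalizing p with
  | nil => rfl
  | cons e rest ih =>
    simp only [pvInnerA, List.filter_cons]
    by_cases hm : pvMatches name e
    · simp only [hm, if_pos, Bool.true_and, pvStep]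
      by_cases hc : e ∈ p
      · simp [hc, ih]
      · simp [hc, ih]
    · simp [hm, ih]

theorem pvStep_append (xs ys : List String) (p : List String) :
    pvStep (xs ++ ys) p =
      match pvStep xs p with
      | Sum.inl r => Sum.inl r
      | Sum.inr q => pvStep ys q := by
  induction xs generalizing p with
  | nil => rfl
  | cons e rest ih =>
    simp only [List.cons_append, pvStep]
    by_cases hc : e ∈ p
    · simp [hc, ih]
    · by_cases h4 : 3 ≤ p.length
      · simp [hc, h4]
      · simp [hc, h4, ih]

theorem pvOuterA_eq_step (files : List String) (names : List String) (p : List String) :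
    pvOuterA files names p =
      pvStep (names.flatMap (fun name => files.filter (fun e => pvMatches name e))) p := by
  induction names generalizing p with
  | nil => rfl
  | cons n rest ih =>
    simp only [pvOuterA, List.flatMap_cons, pvInnerA_eq_step, pvStep_append]
    cases h : pvStep (files.filter (fun e => pvMatches n e)) p with
    | inl r => simp
    | inr q => simp [ih]

theorem pvFillA_eq_step (files : List String) (p : List String) :
    pvFillA files p = pvFinish (pvStep files p) := by
  induction files generalizing p with
  | nil => rfl
  | cons e rest ih =>
    simp only [pvFillA, pvStep]
    by_cases hc : e ∈ p
    · simp [hc, ih]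
    · by_cases h4 : 3 ≤ p.length
      · simp [hc, h4, pvFinish]
      · simp [hc, h4, ih]

-- foldl Set.add only appends
theorem pvFoldAdd_prefix (s : List String) (p : List String) :
    ∃ t, s.foldl PySem.Set.add p = p ++ t := by
  induction s generalizing p with
  | nil => exact ⟨[], by simp⟩
  | cons e rest ih =>
    rw [List.foldl_cons]
    by_cases hc : e ∈ p
    · have h : PySem.Set.add p e = p := by simp [PySem.Set.add, hc]
      rw [h]; exact ih p
    · have h : PySem.Set.add p e = p ++ [e] := by simp [PySem.Set.add, hc]
      rw [h]
      rcases ih (p ++ [e]) with ⟨t, ht⟩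
      exact ⟨e :: t, by simp [ht]⟩

theorem pvStep_eq_dedup (s : List String) (p : List String) (hp : p.length < 4) :
    pvFinish (pvStep s p) = (s.foldl PySem.Set.add p).take 4 := by
  induction s generalizing p with
  | nil =>
    simp only [pvStep, pvFinish, List.foldl_nil]
    exact (List.take_of_length_le (by omega)).symm
  | cons e rest ih =>
    by_cases hc : e ∈ p
    · have hadd : PySem.Set.add p e = p := by simp [PySem.Set.add, hc]
      have hstep : pvStep (e :: rest) p = pvStep rest p := by simp [pvStep, hc]
      rw [hstep, List.foldl_cons, hadd]
      exact ih p hp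
    · have hadd : PySem.Set.add p e = p ++ [e] := by simp [PySem.Set.add, hc]
      by_cases h4 : 3 ≤ p.length
      · have hstep : pvStep (e :: rest) p = Sum.inl (p ++ [e]) := by simp [pvStep, hc, h4]
        rw [hstep, List.foldl_cons, hadd]
        rcases pvFoldAdd_prefix rest (p ++ [e]) with ⟨t, ht⟩
        have hl : (p ++ [e]).length = 4 := by simp; omega
        rw [ht]
        simp only [pvFinish]
        rw [← hl, List.take_left]
      · have hstep : pvStep (e :: rest) p = pvStep rest (p ++ [e]) := by simp [pvStep, hc, h4]
        rw [hstep, List.foldl_cons, hadd]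
        exact ih (p ++ [e]) (by simp; omega)

-- A's auto part is take 4 of the ordered dedup of the priority-matching stream then all files
theorem pvAutoA_eq_dedup (files : List String) :
    pvAutoA files =
      (PySem.Set.ofList
        (pvPriority.flatMap (fun n => files.filter (fun e => pvMatches n e)) ++ files)).take 4 := by
  have h1 : pvAutoA files =
      pvFinish (pvStep (pvPriority.flatMap
        (fun name => files.filter (fun e => pvMatches name e)) ++ files) []) := by
    simp only [pvAutoA, pvOuterA_eq_step, pvStep_append]
    cases h : pvStep (pvPriority.flatMap
        (fun name => files.filter (fun e => pvMatches name e))) [] with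
    | inl r => simp [pvFinish]
    | inr q => simp [pvFillA_eq_step, pvFinish]
  rw [h1, pvStep_eq_dedup _ _ (by simp), PySem.Set.ofList_eq_foldl]

-- dropping from a stream elements already in the accumulator does not change the set
theorem pvUpdate_filter (xs : List String) (p : String → Bool) :
    ∀ acc : List String, (∀ x ∈ xs, p x = false → x ∈ acc) →
    PySem.Set.update acc (xs.filter p) = PySem.Set.update acc xs := by
  induction xs with
  | nil => intro acc _; rfl
  | cons x rest ih =>
    intro acc hacc
    by_cases hp : p x
    · rw [List.filter_cons_of_pos hp, PySem.Set.update_cons, PySem.Set.update_cons]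
      exact ih (PySem.Set.add acc x) (fun y hy hpy =>
        (PySem.Set.mem_add _ _ _).mpr (Or.inl (hacc y (List.mem_cons_of_mem x hy) hpy)))
    · have hx : x ∈ acc := hacc x List.mem_cons_self (by simp [hp])
      rw [List.filter_cons_of_neg (by simp [hp]), PySem.Set.update_cons]
      have : PySem.Set.add acc x = acc := by simp [PySem.Set.add, hx]
      rw [this]
      exact ih acc (fun y hy hpy => hacc y (List.mem_cons_of_mem x hy) hpy)

-- the same, blockwise over a flatMap of streams
theorem pvUpdate_flatMap_filter {β : Type} (rs : List β) (g : β → List String) (p : String → Bool) :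
    ∀ acc : List String, (∀ r ∈ rs, ∀ x ∈ g r, p x = false → x ∈ acc) →
    PySem.Set.update acc (rs.flatMap (fun r => (g r).filter p)) =
    PySem.Set.update acc (rs.flatMap g) := by
  induction rs with
  | nil => intro acc _; rfl
  | cons r rest ih =>
    intro acc hacc
    rw [List.flatMap_cons, List.flatMap_cons, PySem.Set.update_append, PySem.Set.update_append,
      pvUpdate_filter (g r) p acc (hacc r List.mem_cons_self)]
    exact ih (PySem.Set.update acc (g r)) (fun r' hr' x hx hpx =>
      (PySem.Set.mem_update _ _ _).mpr (Or.inl (hacc r' (List.mem_cons_of_mem r hr') x hx hpx)))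

-- KEY LEMMA: the name-major matching stream followed by all files has the same ordered
-- dedup as the rank partition of the files (buckets 0..names.length, last = unmatched).
theorem pvBlocks_eq (names : List String) :
    ∀ (files acc : List String),
    PySem.Set.update acc (names.flatMap (fun n => files.filter (fun e => pvMatches n e)) ++ files) =
    PySem.Set.update acc ((List.range (names.length + 1)).flatMap
      (fun r => files.filter (fun e => decide (names.findIdx (fun n => pvMatches n e) = r)))) := by
  induction names with
  | nil =>
    intro files acc
    have hr1 : List.range (0 + 1) = [0] := rfl
    simp only [List.flatMap_nil, List.nil_append, List.length_nil, hr1,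
      List.flatMap_cons, List.flatMap_nil, List.append_nil]
    congr 1
    refine (List.filter_eq_self.mpr ?_).symm
    intro e _
    simp [List.findIdx, List.findIdx.go]
  | cons n ns ih =>
    intro files acc
    -- peel block 0 = the files matching the head name, on both sides
    have hrange : List.range ((n :: ns).length + 1) = 0 :: (List.range (ns.length + 1)).map Nat.succ := by
      rw [List.length_cons]
      exact List.range_succ_eq_map
    have hblock0 :
        files.filter (fun e => decide ((n :: ns).findIdx (fun m => pvMatches m e) = 0)) =
        files.filter (fun e => pvMatches n e) := by
      apply List.filter_congr
      intro e _
      by_cases hm : pvMatches n e <;> simp [List.findIdx_cons, hm]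
    have hblockS : ∀ r : Nat,
        files.filter (fun e => decide ((n :: ns).findIdx (fun m => pvMatches m e) = r + 1)) =
        (files.filter (fun e => decide (ns.findIdx (fun m => pvMatches m e) = r))).filter
          (fun e => !(pvMatches n e)) := by
      intro r
      rw [List.filter_filter]
      apply List.filter_congr
      intro e _
      by_cases hm : pvMatches n e <;> simp [List.findIdx_cons, hm]
    calc PySem.Set.update acc
          ((n :: ns).flatMap (fun m => files.filter (fun e => pvMatches m e)) ++ files)
        = PySem.Set.update (PySem.Set.update acc (files.filter (fun e => pvMatches n e)))
            (ns.flatMap (fun m => files.filter (fun e => pvMatches m e)) ++ files) := by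
          rw [List.flatMap_cons, List.append_assoc, PySem.Set.update_append]
      _ = PySem.Set.update (PySem.Set.update acc (files.filter (fun e => pvMatches n e)))
            ((List.range (ns.length + 1)).flatMap
              (fun r => files.filter (fun e => decide (ns.findIdx (fun m => pvMatches m e) = r)))) :=
          ih files (PySem.Set.update acc (files.filter (fun e => pvMatches n e)))
      _ = PySem.Set.update (PySem.Set.update acc (files.filter (fun e => pvMatches n e)))
            ((List.range (ns.length + 1)).flatMap
              (fun r => (files.filter (fun e => decide (ns.findIdx (fun m => pvMatches m e) = r))).filter
                (fun e => !(pvMatches n e)))) := by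
          refine (pvUpdate_flatMap_filter _ _ _ _ ?_).symm
          intro r _ x hx hpx
          apply (PySem.Set.mem_update _ _ _).mpr
          refine Or.inr (List.mem_filter.mpr ⟨(List.mem_filter.mp hx).1, ?_⟩)
          simpa using hpx
      _ = PySem.Set.update acc ((List.range ((n :: ns).length + 1)).flatMap
            (fun r => files.filter (fun e => decide ((n :: ns).findIdx (fun m => pvMatches m e) = r)))) := by
          rw [hrange, List.flatMap_cons, hblock0, List.flatMap_map, PySem.Set.update_append]
          refine congrArg _ (List.flatMap_congr ?_)
          intro r _
          exact (hblockS r).symm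

-- the bucket fold computes exactly the rank partition
theorem pvRank_lt (e : String) : pvRank e < 13 := by
  have h : pvPriority.findIdx (fun n => pvMatches n e) ≤ pvPriority.length :=
    List.findIdx_le_length
  have hl : pvPriority.length = 12 := rfl
  rw [hl] at h
  unfold pvRank
  omega

theorem pvBuckets_eq (files : List String) :
    files.foldl pvBucketStep (List.replicate 13 []) =
      (List.range 13).map (fun r => files.filter (fun e => decide (pvRank e = r))) := by
  induction files using List.reverseRecOn with
  | nil => rfl
  | append_singleton xs e ih =>
    rw [List.foldl_append, List.foldl_cons, List.foldl_nil, ih]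
    apply List.ext_getElem
    · simp [pvBucketStep]
    · intro j hj hj'
      have hjl : j < 13 := by simpa using hj'
      have hre : pvRank e < 13 := pvRank_lt e
      simp only [pvBucketStep, List.getElem_set, List.getElem_map, List.getElem_range,
        List.getD_eq_getElem?_getD, List.getElem?_map, List.getElem?_range, hre,
        List.filter_append, List.filter_cons, List.filter_nil]
      by_cases hje : pvRank e = j
      · subst hje
        simp
      · simp [hje]

-- combining: the two auto-generation routines agree
theorem pvAuto_eq (files : List String) : pvAutoA files = pvAutoB files := by
  rw [pvAutoA_eq_dedup]
  simp only [pvAutoB, pvBuckets_eq, PySem.List.dedup_eq_ofList]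
  have hflat : ((List.range 13).map
      (fun r => files.filter (fun e => decide (pvRank e = r)))).flatMap id =
      (List.range 13).flatMap (fun r => files.filter (fun e => decide (pvRank e = r))) := by
    rw [List.flatMap_map]; rfl
  rw [hflat]
  have h := pvBlocks_eq pvPriority files []
  have hlen : pvPriority.length + 1 = 13 := by rfl
  rw [hlen] at h
  have hofL : ∀ s : List String, PySem.Set.update [] s = PySem.Set.ofList s := by
    intro s; rw [PySem.Set.ofList_eq_foldl]; rfl
  rw [hofL, hofL] at h
  rw [h]
  rfl

-- ===== VERDICT (by name: the statement is the Claim_ definition above) =====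
theorem generate_pack_preview_spec : Claim_equal_generate_pack_preview := by
  intro files ex _
  unfold Spec_generate_pack_preview generate_pack_preview generate_pack_preview_alt
  cases ex with
  | none => exact pvAuto_eq files
  | some l =>
    by_cases h4 : 4 ≤ l.length
    · simp only [h4, if_pos]
      by_cases hv : 4 ≤ (pvValidPreview files l).length
      · simp [hv]
      · simp [hv, pvAuto_eq]
    · simp [h4, pvAuto_eq]
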